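-- pv_equiv track=rewrite | github.com/sandeepa-cpu/OmniScan-AI | main.py | _severity_summary
-- ===== SOURCE A (Python) =====
-- def _severity_summary(rows: list[dict]) -> str:
--     counts = {"High": 0, "Medium": 0, "Low": 0}
--     for r in rows:
--         counts[r.get("severity", "Low")] = counts.get(r.get("severity", "Low"), 0) + 1
--     return (
--         f"[bold red]High: {counts['High']}[/bold red]  "
--         f"[bold yellow]Medium: {counts['Medium']}[/bold yellow]  "
--         f"[bold cyan]Low: {counts['Low']}[/bold cyan]"
--     )
-- ===== SOURCE B (Python) =====
-- def _severity_summary(rows: list[dict]) -> str: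
--     high = sum(1 for r in rows if r.get("severity", "Low") == "High")
--     medium = sum(1 for r in rows if r.get("severity", "Low") == "Medium")
--     low = sum(1 for r in rows if r.get("severity", "Low") == "Low")
--     return (
--         f"[bold red]High: {high}[/bold red]  "
--         f"[bold yellow]Medium: {medium}[/bold yellow]  "
--         f"[bold cyan]Low: {low}[/bold cyan]"
--     )
-- ===== Notes on version B (the rewrite author's own statement) =====
-- stated objective: simpler
-- what changed: Replaces the dict-accumulating single pass (which also stores counts for severities never printed) with three independent filtered sums, one per printed severity.
import Mathlib
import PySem

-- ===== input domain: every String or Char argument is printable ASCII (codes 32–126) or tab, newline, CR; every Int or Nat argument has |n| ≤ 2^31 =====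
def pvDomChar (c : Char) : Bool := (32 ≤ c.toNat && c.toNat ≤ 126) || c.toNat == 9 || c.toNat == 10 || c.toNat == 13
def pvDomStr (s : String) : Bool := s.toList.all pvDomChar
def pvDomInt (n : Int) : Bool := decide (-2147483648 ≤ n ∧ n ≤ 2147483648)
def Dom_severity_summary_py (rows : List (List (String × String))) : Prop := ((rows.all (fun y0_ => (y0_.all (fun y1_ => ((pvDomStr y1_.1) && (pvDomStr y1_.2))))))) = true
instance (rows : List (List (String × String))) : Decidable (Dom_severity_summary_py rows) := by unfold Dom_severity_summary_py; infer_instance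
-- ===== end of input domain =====

-- B replaces A's dict-accumulating single pass by three independent filtered counts (simpler decomposition, same O(n) cost).

-- r.get("severity", "Low") — shared by both Pythons, a helper in both ports
def pvGetSev (r : List (String × String)) : String :=
  (PySem.Dict.mk r).getD "severity" "Low"

-- ===== PORT A =====
def severity_summary_py (rows : List (List (String × String))) : String :=
  -- counts = {"High": 0, "Medium": 0, "Low": 0}
  let counts0 : PySem.Dict String Int :=
    ((PySem.Dict.empty.insert "High" 0).insert "Medium" 0).insert "Low" 0
  -- for r in rows: counts[r.get(...)] = counts.get(r.get(...), 0) + 1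
  let counts := rows.foldl
    (fun d r => d.insert (pvGetSev r) (d.getD (pvGetSev r) 0 + 1)) counts0
  -- counts['High'] etc.: the three keys are always present, so getD _ 0 is exact here
  "[bold red]High: " ++ PySem.Int.toStr (counts.getD "High" 0) ++ "[/bold red]  " ++
  "[bold yellow]Medium: " ++ PySem.Int.toStr (counts.getD "Medium" 0) ++ "[/bold yellow]  " ++
  "[bold cyan]Low: " ++ PySem.Int.toStr (counts.getD "Low" 0) ++ "[/bold cyan]"

-- ===== PORT B =====
def severity_summary_py_alt (rows : List (List (String × String))) : String :=
  -- sum(1 for r in rows if r.get("severity","Low") == X), for each printed severity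
  let high : Int := rows.countP (fun r => pvGetSev r == "High")
  let medium : Int := rows.countP (fun r => pvGetSev r == "Medium")
  let low : Int := rows.countP (fun r => pvGetSev r == "Low")
  "[bold red]High: " ++ PySem.Int.toStr high ++ "[/bold red]  " ++
  "[bold yellow]Medium: " ++ PySem.Int.toStr medium ++ "[/bold yellow]  " ++
  "[bold cyan]Low: " ++ PySem.Int.toStr low ++ "[/bold cyan]"

-- ===== PRECONDITION & SPEC =====
def Spec_severity_summary_py (rows : List (List (String × String))) (out : String) : Prop := out = severity_summary_py_alt rows
instance (rows : List (List (String × String))) (out : String) : Decidable (Spec_severity_summary_py rows out) := by unfold Spec_severity_summary_py; infer_instance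

-- ===== CLAIM (what is proved, stated in full; the proofs are below) =====
def Claim_equal_severity_summary_py : Prop := ∀ (rows : List (List (String × String))), Dom_severity_summary_py rows → Spec_severity_summary_py rows (severity_summary_py rows)

-- ===== LEMMAS AND PROOFS =====

-- invariant of A's counting loop: each key's final count is its start value plus the
-- number of rows whose (defaulted) severity equals that key
theorem foldl_insert_count (v : String) (rows : List (List (String × String)))
    (d : PySem.Dict String Int) :
    (rows.foldl (fun d r => d.insert (pvGetSev r) (d.getD (pvGetSev r) 0 + 1)) d).getD v 0
      = d.getD v 0 + (rows.countP (fun r => pvGetSev r == v) : Int) := by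
  induction rows generalizing d with
  | nil => simp
  | cons r rest ih =>
    simp only [List.foldl_cons, List.countP_cons, ih]
    rw [PySem.Dict.getD_insert]
    by_cases h : pvGetSev r = v
    · simp [h]; push_cast; ring
    · have hb : (pvGetSev r == v) = false := by simp [h]
      simp [hb, Ne.symm h]

-- ===== VERDICT (by name: the statement is the Claim_ definition above) =====
theorem severity_summary_py_spec : Claim_equal_severity_summary_py := by
  intro rows _
  unfold Spec_severity_summary_py severity_summary_py severity_summary_py_alt
  simp only [foldl_insert_count]
  rw [show (((PySem.Dict.empty.insert "High" (0:Int)).insert "Medium" 0).insert "Low" 0).getD "High" 0 = 0 by decide,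
      show (((PySem.Dict.empty.insert "High" (0:Int)).insert "Medium" 0).insert "Low" 0).getD "Medium" 0 = 0 by decide,
      show (((PySem.Dict.empty.insert "High" (0:Int)).insert "Medium" 0).insert "Low" 0).getD "Low" 0 = 0 by decide]
  simp
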